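-- pv_equiv track=rewrite | github.com/bmolparia/metaproteomics | analysis/get_organisms_from_fasta_deflines.py | fasta_to_organism_refseq
-- ===== SOURCE A (Python) =====
-- def fasta_to_organism_refseq(fasta_defline):
--     '''
--     refseq defline are retarded and have no standardized way of noting organism with square brackets
--     testers:
--     string = "[GSEE] tandem repeats [Invertebrate iridescent virus 30]"
--     string = "coat protein [Euphorbia mosaic virus - A [Mexico:Yucatan:2004]]" #pID: 745
--     string = "[citrate [pro-3S]-lyase] ligase [Vibrio cholerae]"
--     '''
--     # If there are 8 pipes (coming from fasta file)
--     if fasta_defline.count('|') == 8: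
--         # Split defline by '|'. Take the 6th
--         txt = fasta_defline.split('|')[6].strip()
--     elif fasta_defline.count('|') == 4:
--         txt = fasta_defline.split('|')[-1].strip()
--     else:
--         txt = fasta_defline
--
--     try:
--         if txt.count('[') != txt.count(']'):
--             # logger.warn('Malformed defline: ' + fasta_defline)
--              # Just return whatever is between the last '[' and the last ']'
--             txt_flip = txt[::-1]
--             organism = txt_flip[txt_flip.find(']')+1:txt_flip.find('[')][::-1]
--             return organism
--
--
--         brackets = list(parse_brackets(txt))
--         # if there are nested brackets
--         if max(list(zip(*brackets))[0]) > 0: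
--             # take the string at level 0
--             organism = [x[1] for x in brackets if x[0] == 0]
--             return organism[-1]
--         else:
--             # there are no nested brackets
--             # take the last brackets
--             return brackets[-1][1]
--     except Exception:
--         return None
--
-- def parse_brackets(string):
--     """Generate parenthesized contents in string as pairs (level, contents).
--     http://stackoverflow.com/questions/4284991/parsing-nested-parentheses-in-python-grab-content-by-level
--     """
--     stack = []
--     for i, c in enumerate(string):
--         if c == '[':
--             stack.append(i)
--         elif c == ']' and stack:
--             start = stack.pop()
--             yield (len(stack), string[start + 1: i])
-- ===== SOURCE B (Python) =====
-- def fasta_to_organism_refseq(fasta_defline):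
--     # Pipe preamble folded into one branch on the pipe count
--     npipe = fasta_defline.count('|')
--     if npipe == 8 or npipe == 4:
--         txt = fasta_defline.split('|')[6 if npipe == 8 else -1].strip()
--     else:
--         txt = fasta_defline
--
--     # Malformed: unequal bracket counts -> between last '[' and last ']' of the flip
--     if txt.count('[') != txt.count(']'):
--         rev = txt[::-1]
--         return rev[rev.find(']')+1:rev.find('[')][::-1]
--
--     # One fold over the characters: a depth counter and a character buffer;
--     # the buffer is re-started at each top-level '[' and emitted at the matching ']'.
--     depth = 0
--     buf = []
--     last = None
--     for c in txt:
--         if c == '[':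
--             if depth:
--                 buf.append(c)
--             else:
--                 buf = []
--             depth += 1
--         elif c == ']' and depth:
--             depth -= 1
--             if depth:
--                 buf.append(c)
--             else:
--                 last = ''.join(buf)
--         elif depth:
--             buf.append(c)
--     return last
-- ===== Notes on version B (the rewrite author's own statement) =====
-- stated objective: simpler
-- what changed: The index-stack parse_brackets generator, the materialised bracket list and its two classification passes (max level, level-0 filter) are replaced by one fold over the characters with a depth counter and a character buffer that directly emits the most recent top-level bracketed contents (None when none, matching A's caught IndexError); the two pipe-count branches are folded into one.
import Mathlib
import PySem

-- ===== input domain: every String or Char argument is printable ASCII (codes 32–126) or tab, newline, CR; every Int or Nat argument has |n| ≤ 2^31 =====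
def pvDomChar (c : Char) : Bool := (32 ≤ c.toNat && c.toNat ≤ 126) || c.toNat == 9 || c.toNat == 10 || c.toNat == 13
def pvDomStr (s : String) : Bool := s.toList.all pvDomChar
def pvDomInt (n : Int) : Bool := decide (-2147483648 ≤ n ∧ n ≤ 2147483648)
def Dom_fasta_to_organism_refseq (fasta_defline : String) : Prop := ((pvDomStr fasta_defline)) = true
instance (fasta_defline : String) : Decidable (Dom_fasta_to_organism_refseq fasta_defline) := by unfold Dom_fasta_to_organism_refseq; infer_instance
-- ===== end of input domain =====

-- B replaces A's index-stack parse_brackets generator and its two-pass max-level/level-0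
-- classification by one fold with a depth counter and a character buffer (objective: simpler).

-- ===== PORT A =====
-- parse_brackets: stack of '[' indices (head = most recent), yields (level, contents) appended in order.
-- s[start+1:i] with 0 ≤ start+1 ≤ i ≤ len s is exactly (s.drop (start+1)).take (i - (start+1)).
def pvParseBrackets (s : List Char) : List Char → Nat → List Nat → List (Nat × List Char) → List (Nat × List Char)
  | [], _, _, acc => acc
  | c :: rest, i, stack, acc =>
    if c = '[' then
      pvParseBrackets s rest (i + 1) (i :: stack) acc
    else if c = ']' then
      match stack with
      | [] => pvParseBrackets s rest (i + 1) [] acc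
      | start :: stack' =>
          pvParseBrackets s rest (i + 1) stack'
            (acc ++ [(stack'.length, (s.drop (start + 1)).take (i - (start + 1)))])
    else pvParseBrackets s rest (i + 1) stack acc

def fasta_to_organism_refseq (fasta_defline : String) : Option String :=
  -- preamble: pipe-count dispatch (split('|')[6] is in range whenever count = 8; [-1] via pyGetD)
  let txt : List Char :=
    if PySem.Chars.count fasta_defline.toList ['|'] = 8 then
      PySem.Chars.strip (PySem.List.pyGetD (PySem.Chars.splitOn fasta_defline.toList ['|']) 6 [])
    else if PySem.Chars.count fasta_defline.toList ['|'] = 4 then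
      PySem.Chars.strip (PySem.List.pyGetD (PySem.Chars.splitOn fasta_defline.toList ['|']) (-1) [])
    else fasta_defline.toList
  if PySem.Chars.count txt ['['] ≠ PySem.Chars.count txt [']'] then
    -- malformed-count branch: txt[::-1] then slice between the finds, reversed back
    let flip := txt.reverse
    some (String.ofList ((PySem.List.slice flip
      (some (PySem.Chars.find flip [']'] + 1)) (some (PySem.Chars.find flip ['[']))).reverse))
  else
    let brackets := pvParseBrackets txt txt 0 [] []
    -- max(list(zip(*brackets))[0]): IndexError on empty brackets, caught → None
    match PySem.List.max? (brackets.map Prod.fst) (fun x => x) with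
    | none => none
    | some m =>
      if 0 < m then
        -- [x[1] for x in brackets if x[0] == 0][-1]; IndexError on empty, caught → None
        (((brackets.filter (fun x => x.1 = 0)).map (fun x => x.2)).getLast?).map String.ofList
      else
        (brackets.getLast?).map (fun x => String.ofList x.2)

-- ===== PORT B =====
-- loop body of B's single fold: state = (depth, buffer, last emitted top-level contents)
def pvScanStep (st : Nat × List Char × Option (List Char)) (c : Char) : Nat × List Char × Option (List Char) :=
  if c = '[' then
    (st.1 + 1, if st.1 ≠ 0 then st.2.1 ++ [c] else [], st.2.2)
  else if c = ']' ∧ st.1 ≠ 0 then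
    if st.1 - 1 ≠ 0 then (st.1 - 1, st.2.1 ++ [c], st.2.2)
    else (0, st.2.1, some st.2.1)
  else if st.1 ≠ 0 then (st.1, st.2.1 ++ [c], st.2.2)
  else st

def fasta_to_organism_refseq_alt (fasta_defline : String) : Option String :=
  let npipe := PySem.Chars.count fasta_defline.toList ['|']
  let txt : List Char :=
    if npipe = 8 ∨ npipe = 4 then
      PySem.Chars.strip (PySem.List.pyGetD (PySem.Chars.splitOn fasta_defline.toList ['|'])
        (if npipe = 8 then 6 else -1) [])
    else fasta_defline.toList
  if PySem.Chars.count txt ['['] ≠ PySem.Chars.count txt [']'] then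
    let rev := txt.reverse
    some (String.ofList ((PySem.List.slice rev
      (some (PySem.Chars.find rev [']'] + 1)) (some (PySem.Chars.find rev ['[']))).reverse))
  else
    ((txt.foldl pvScanStep (0, [], none)).2.2).map String.ofList

-- ===== PRECONDITION & SPEC =====
def Spec_fasta_to_organism_refseq (fasta_defline : String) (out : Option String) : Prop := out = fasta_to_organism_refseq_alt fasta_defline
instance (fasta_defline : String) (out : Option String) : Decidable (Spec_fasta_to_organism_refseq fasta_defline out) := by unfold Spec_fasta_to_organism_refseq; infer_instance

-- ===== CLAIM (what is proved, stated in full; the proofs are below) =====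
def Claim_equal_fasta_to_organism_refseq : Prop := ∀ (fasta_defline : String), Dom_fasta_to_organism_refseq fasta_defline → Spec_fasta_to_organism_refseq fasta_defline (fasta_to_organism_refseq fasta_defline)

-- ===== LEMMAS AND PROOFS =====

-- the last level-0 contents of a bracket list
def pvLevel0Last (acc : List (Nat × List Char)) : Option (List Char) :=
  ((acc.filter (fun x => x.1 = 0)).map (fun x => x.2)).getLast?

theorem pvGetLastD_indep {l : List Nat} (h : l ≠ []) (a b : Nat) : l.getLastD a = l.getLastD b := by
  rw [List.getLastD_eq_getLast?, List.getLastD_eq_getLast?]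
  cases hq : l.getLast? with
  | none => exact absurd (List.getLast?_eq_none_iff.mp hq) h
  | some v => rfl

-- extending the captured slice by one character
theorem pvTake_snoc {s : List Char} {i b : Nat} {c : Char} {rest : List Char}
    (hb : b + 1 ≤ i) (hd : s.drop i = c :: rest) :
    (s.drop (b + 1)).take (i + 1 - (b + 1)) = (s.drop (b + 1)).take (i - (b + 1)) ++ [c] := by
  have hsi : s[i]? = some c := by
    have h0 := congrArg (fun l : List Char => l[0]?) hd
    simpa using h0
  have hget : (s.drop (b + 1))[i - (b + 1)]? = some c := by
    rw [List.getElem?_drop]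
    have he : b + 1 + (i - (b + 1)) = i := by omega
    rw [he, hsi]
  have he2 : i + 1 - (b + 1) = (i - (b + 1)) + 1 := by omega
  rw [he2, List.take_add_one, hget]; rfl

-- invariant: B's fold over the rest of the string tracks parse_brackets' stack length,
-- the slice since the bottom-of-stack '[', and the last level-0 contents so far
theorem pvFold_eq_parse (s : List Char) : ∀ (rest : List Char) (i : Nat) (stack : List Nat)
    (acc : List (Nat × List Char)) (buf : List Char),
    s.drop i = rest →
    (stack ≠ [] → stack.getLastD 0 + 1 ≤ i ∧
      buf = (s.drop (stack.getLastD 0 + 1)).take (i - (stack.getLastD 0 + 1))) →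
    (rest.foldl pvScanStep (stack.length, buf, pvLevel0Last acc)).2.2
      = pvLevel0Last (pvParseBrackets s rest i stack acc) := by
  intro rest
  induction rest with
  | nil => intro i stack acc buf _ _; simp [pvParseBrackets]
  | cons c rest ih =>
    intro i stack acc buf hdrop hinv
    have hdrop' : s.drop (i + 1) = rest := by
      rw [← List.drop_drop]; rw [hdrop]; rfl
    by_cases hc : c = '['
    · cases stack with
      | nil =>
        simp only [List.foldl_cons, pvParseBrackets, if_pos hc, pvScanStep, List.length_nil,
          if_neg (by simp : ¬ (0 : Nat) ≠ 0)]
        exact ih (i + 1) [i] acc [] hdrop' (fun _ => by simp)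
      | cons a t =>
        have hbt := hinv (by simp)
        have hlastc : (i :: a :: t : List Nat).getLastD 0 = (a :: t).getLastD 0 := by
          rw [List.getLastD_cons]; exact pvGetLastD_indep (l := a :: t) (by simp) i 0
        simp only [List.foldl_cons, pvParseBrackets, if_pos hc, pvScanStep, List.length_cons,
          if_pos (Nat.succ_ne_zero t.length)]
        refine ih (i + 1) (i :: a :: t) acc (buf ++ [c]) hdrop' (fun _ => ?_)
        rw [hlastc]
        constructor
        · omega
        · rw [hbt.2]; exact (pvTake_snoc hbt.1 hdrop).symm
    · by_cases hc2 : c = ']'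
      · cases stack with
        | nil =>
          simp only [List.foldl_cons, pvParseBrackets, if_neg hc, if_pos hc2, pvScanStep,
            List.length_nil,
            if_neg (by simp : ¬ (c = ']' ∧ (0 : Nat) ≠ 0)), if_neg (by simp : ¬ (0 : Nat) ≠ 0)]
          exact ih (i + 1) [] acc buf hdrop' (by simp)
        | cons j t =>
          have hbt := hinv (by simp)
          cases t with
          | nil =>
            -- top-level close: B emits the buffer, A appends a level-0 pair
            have hj : (([j] : List Nat).getLastD 0) = j := rfl
            rw [hj] at hbt
            simp only [List.foldl_cons, pvParseBrackets, if_neg hc, if_pos hc2, pvScanStep,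
              List.length_cons, List.length_nil,
              if_pos (⟨hc2, by omega⟩ : c = ']' ∧ (0 + 1 : Nat) ≠ 0),
              if_neg (by omega : ¬ (0 + 1 - 1 : Nat) ≠ 0)]
            have hbuf : buf = (s.drop (j + 1)).take (i - (j + 1)) := hbt.2
            have hlast : some buf = pvLevel0Last (acc ++ [(0, (s.drop (j + 1)).take (i - (j + 1)))]) := by
              simp [pvLevel0Last, List.filter_append, hbuf]
            rw [hlast]
            exact ih (i + 1) [] (acc ++ [(0, (s.drop (j + 1)).take (i - (j + 1)))]) buf hdrop' (by simp)
          | cons a u =>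
            -- nested close: A appends a positive-level pair, B keeps scanning
            have hlastc : ((j :: a :: u : List Nat).getLastD 0) = (a :: u).getLastD 0 :=
              List.getLastD_cons ..
            rw [hlastc] at hbt
            simp only [List.foldl_cons, pvParseBrackets, if_neg hc, if_pos hc2, pvScanStep,
              List.length_cons,
              if_pos (⟨hc2, by omega⟩ : c = ']' ∧ (u.length + 1 + 1 : Nat) ≠ 0),
              Nat.add_sub_cancel]
            have hkeep : pvLevel0Last acc = pvLevel0Last (acc ++ [(u.length + 1,
                (s.drop (j + 1)).take (i - (j + 1)))]) := by
              simp [pvLevel0Last, List.filter_append]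
            rw [hkeep]
            refine ih (i + 1) (a :: u)
              (acc ++ [(u.length + 1, (s.drop (j + 1)).take (i - (j + 1)))]) (buf ++ [c]) hdrop'
              (fun _ => ⟨by omega, ?_⟩)
            rw [hbt.2]; exact (pvTake_snoc hbt.1 hdrop).symm
      · -- ordinary character
        cases stack with
        | nil =>
          simp only [List.foldl_cons, pvParseBrackets, if_neg hc, if_neg hc2, pvScanStep,
            List.length_nil,
            if_neg (by simp [hc2] : ¬ (c = ']' ∧ (0 : Nat) ≠ 0)), if_neg (by simp : ¬ (0 : Nat) ≠ 0)]
          exact ih (i + 1) [] acc buf hdrop' (by simp)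
        | cons a t =>
          have hbt := hinv (by simp)
          simp only [List.foldl_cons, pvParseBrackets, if_neg hc, if_neg hc2, pvScanStep,
            List.length_cons,
            if_neg (by simp [hc2] : ¬ (c = ']' ∧ (t.length + 1 : Nat) ≠ 0)),
            if_pos (Nat.succ_ne_zero t.length)]
          refine ih (i + 1) (a :: t) acc (buf ++ [c]) hdrop' (fun _ => ⟨by omega, ?_⟩)
          rw [hbt.2]; exact (pvTake_snoc hbt.1 hdrop).symm

theorem pvA_main (txt : List Char) :
    (match PySem.List.max? ((pvParseBrackets txt txt 0 [] []).map Prod.fst) (fun x => x) with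
      | none => none
      | some m =>
        if 0 < m then
          ((((pvParseBrackets txt txt 0 [] []).filter (fun x => x.1 = 0)).map (fun x => x.2)).getLast?).map String.ofList
        else
          ((pvParseBrackets txt txt 0 [] []).getLast?).map (fun x => String.ofList x.2))
      = (pvLevel0Last (pvParseBrackets txt txt 0 [] [])).map String.ofList := by
  cases hm : PySem.List.max? ((pvParseBrackets txt txt 0 [] []).map Prod.fst) (fun x => x) with
  | none =>
    have hnil : pvParseBrackets txt txt 0 [] [] = [] := by
      have := Iff.mp (PySem.List.max?_eq_none_iff _ _) hm
      simpa using this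
    simp [pvLevel0Last, hnil]
  | some m =>
    by_cases h0 : 0 < m
    · simp [h0, pvLevel0Last]
    · have hall : ∀ y ∈ (pvParseBrackets txt txt 0 [] []).map Prod.fst, y = 0 := by
        intro y hy
        have := PySem.List.max?_isMax hm y hy
        omega
      have hfilt : (pvParseBrackets txt txt 0 [] []).filter (fun x => decide (x.1 = 0))
          = pvParseBrackets txt txt 0 [] [] :=
        List.filter_eq_self.mpr (fun x hx => by
          simpa using hall x.1 (List.mem_map_of_mem hx))
      simp only [if_neg h0, pvLevel0Last, hfilt, List.getLast?_map, Option.map_map]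
      rfl

-- ===== VERDICT (by name: the statement is the Claim_ definition above) =====
theorem fasta_to_organism_refseq_spec : Claim_equal_fasta_to_organism_refseq := by
  intro s _
  show _ = _
  simp only [fasta_to_organism_refseq, fasta_to_organism_refseq_alt]
  -- the two pipe-count preambles compute the same txt
  have htxt :
      (if PySem.Chars.count s.toList ['|'] = 8 ∨ PySem.Chars.count s.toList ['|'] = 4 then
        PySem.Chars.strip (PySem.List.pyGetD (PySem.Chars.splitOn s.toList ['|'])
          (if PySem.Chars.count s.toList ['|'] = 8 then 6 else -1) [])
      else s.toList)
      = (if PySem.Chars.count s.toList ['|'] = 8 then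
          PySem.Chars.strip (PySem.List.pyGetD (PySem.Chars.splitOn s.toList ['|']) 6 [])
        else if PySem.Chars.count s.toList ['|'] = 4 then
          PySem.Chars.strip (PySem.List.pyGetD (PySem.Chars.splitOn s.toList ['|']) (-1) [])
        else s.toList) := by
    by_cases h8 : PySem.Chars.count s.toList ['|'] = 8
    · simp [h8]
    · by_cases h4 : PySem.Chars.count s.toList ['|'] = 4 <;> simp [h8, h4]
  rw [htxt]
  generalize (if PySem.Chars.count s.toList ['|'] = 8 then
      PySem.Chars.strip (PySem.List.pyGetD (PySem.Chars.splitOn s.toList ['|']) 6 [])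
    else if PySem.Chars.count s.toList ['|'] = 4 then
      PySem.Chars.strip (PySem.List.pyGetD (PySem.Chars.splitOn s.toList ['|']) (-1) [])
    else s.toList) = txt

  by_cases h : PySem.Chars.count txt ['['] ≠ PySem.Chars.count txt [']']
  · rw [if_pos h, if_pos h]
  · rw [if_neg h, if_neg h, pvA_main txt]
    have := pvFold_eq_parse txt txt 0 [] [] [] (by simp) (by intro h; simp at h)
    simp only [List.length_nil] at this
    rw [← this]
    rfl
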